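-- pv_equiv track=rewrite | github.com/skysky44/algorithm | 프로그래머스/1/161989. 덧칠하기/덧칠하기.py | solution
-- ===== SOURCE A (Python) =====
-- def solution(n, m, section):
--     painted = 0
--     answer = 0
--     for s in section:
--         if s > painted:
--             painted = s + m - 1
--             answer += 1
--     return answer
-- ===== SOURCE B (Python) =====
-- def solution(n, m, section):
--     # Divide and conquer: each sublist denotes a state-transition function
--     # painted -> (painted', rollers used); transitions compose associatively,
--     # so the answer is the whole list's transition applied to the initial state 0.
--     def trans(xs):
--         if not xs:
--             return lambda p: (p, 0)
--         if len(xs) == 1: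
--             s = xs[0]
--             return lambda p: (s + m - 1, 1) if s > p else (p, 0)
--         mid = len(xs) // 2
--         left, right = trans(xs[:mid]), trans(xs[mid:])
--         def comp(p):
--             p1, c1 = left(p)
--             p2, c2 = right(p1)
--             return (p2, c1 + c2)
--         return comp
--     return trans(section)(0)[1]
-- ===== Notes on version B (the rewrite author's own statement) =====
-- stated objective: alternative
-- what changed: Replaces A's single linear pass with a 'painted' accumulator by a divide-and-conquer that recursively builds each half's state-transition function painted -> (painted', roller count) as a closure and composes the two halves; the answer is the whole list's transition applied to the initial state 0.
import Mathlib
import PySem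

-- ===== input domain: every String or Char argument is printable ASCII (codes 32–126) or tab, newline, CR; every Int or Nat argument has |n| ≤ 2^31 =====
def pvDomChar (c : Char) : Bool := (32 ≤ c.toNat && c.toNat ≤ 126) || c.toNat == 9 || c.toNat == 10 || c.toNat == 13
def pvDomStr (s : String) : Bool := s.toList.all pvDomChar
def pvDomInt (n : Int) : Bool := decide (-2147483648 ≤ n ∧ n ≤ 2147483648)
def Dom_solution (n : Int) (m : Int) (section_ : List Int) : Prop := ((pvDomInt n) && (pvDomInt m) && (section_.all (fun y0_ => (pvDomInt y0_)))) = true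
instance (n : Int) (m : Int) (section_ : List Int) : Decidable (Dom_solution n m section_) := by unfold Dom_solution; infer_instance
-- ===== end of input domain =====

-- B replaces A's single left-to-right pass with a divide-and-conquer that builds each half's
-- state-transition function (painted -> (painted', count)) and composes them (objective: alternative).

-- ===== PORT A =====
-- for s in section: if s > painted: painted = s + m - 1; answer += 1
def solution (n : Int) (m : Int) (section_ : List Int) : Int :=
  (section_.foldl
    (fun (st : Int × Int) s => if s > st.1 then (s + m - 1, st.2 + 1) else st)
    (0, 0)).2

-- ===== PORT B =====
-- Source B's `trans`: the sublist's transition function, built by splitting at the midpoint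
def bTrans (m : Int) : List Int → Int → Int × Int
  | [] => fun p => (p, 0)
  | [s] => fun p => if s > p then (s + m - 1, 1) else (p, 0)
  | x :: y :: zs =>
    let mid := (x :: y :: zs).length / 2
    let left := bTrans m ((x :: y :: zs).take mid)
    let right := bTrans m ((x :: y :: zs).drop mid)
    fun p =>
      let q := left p
      let r := right q.1
      (r.1, q.2 + r.2)
termination_by xs => xs.length
decreasing_by
  · simp [List.length_take]; omega
  · simp [List.length_drop]; omega

def solution_alt (n : Int) (m : Int) (section_ : List Int) : Int :=
  (bTrans m section_ 0).2

-- ===== PRECONDITION & SPEC =====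
def Spec_solution (n : Int) (m : Int) (section_ : List Int) (out : Int) : Prop := out = solution_alt n m section_
instance (n : Int) (m : Int) (section_ : List Int) (out : Int) : Decidable (Spec_solution n m section_ out) := by unfold Spec_solution; infer_instance

-- ===== CLAIM (what is proved, stated in full; the proofs are below) =====
def Claim_equal_solution : Prop := ∀ (n : Int) (m : Int) (section_ : List Int), Dom_solution n m section_ → Spec_solution n m section_ (solution n m section_)

-- ===== LEMMAS AND PROOFS =====

-- A's fold step, named for the proofs
def aStep (m : Int) (st : Int × Int) (s : Int) : Int × Int :=
  if s > st.1 then (s + m - 1, st.2 + 1) else st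

-- the count component of A's fold is additive in the starting count
theorem fold_shift (m : Int) (xs : List Int) :
    ∀ (st : Int × Int), xs.foldl (aStep m) st
      = ((xs.foldl (aStep m) (st.1, 0)).1, st.2 + (xs.foldl (aStep m) (st.1, 0)).2) := by
  induction xs with
  | nil => intro st; simp
  | cons s rest ih =>
    intro st
    by_cases h : s > st.1
    · simp only [List.foldl_cons, aStep, if_pos h]
      rw [ih (s + m - 1, st.2 + 1), ih (s + m - 1, 0 + 1)]
      simp only [Prod.mk.injEq]
      exact ⟨trivial, by omega⟩
    · simp only [List.foldl_cons, aStep, if_neg h]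
      exact ih st

-- the divide-and-conquer transition equals A's fold started from the same state
theorem bTrans_eq_fold (m : Int) :
    ∀ (xs : List Int) (p : Int), bTrans m xs p = xs.foldl (aStep m) (p, 0) := by
  intro xs
  induction xs using bTrans.induct m with
  | case1 => intro p; simp [bTrans]
  | case2 s => intro p; by_cases h : s > p <;> simp [bTrans, aStep, h]
  | case3 x y zs _ ihL ihR =>
    intro p
    rw [bTrans]
    simp only []
    rw [ihL, ihR]
    conv_rhs => rw [← List.take_append_drop ((x :: y :: zs).length / 2) (x :: y :: zs)]
    rw [List.foldl_append,
        fold_shift m ((x :: y :: zs).drop ((x :: y :: zs).length / 2))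
          (((x :: y :: zs).take ((x :: y :: zs).length / 2)).foldl (aStep m) (p, 0))]

-- ===== VERDICT (by name: the statement is the Claim_ definition above) =====
theorem solution_spec : Claim_equal_solution := by
  intro n m section_ _
  unfold Spec_solution solution solution_alt
  rw [bTrans_eq_fold]
  rfl
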